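-- pv_equiv track=rewrite | github.com/ffpacheco/Uni | FP/playgrounds/06 2.py | nth_lowest
-- ===== SOURCE A (Python) =====
-- def nth_lowest(lnum:list,n:int):
--     interacoes = 0
--     def index(list,num):
--         permutacoes=0
--         while list[permutacoes]!=num:
--             permutacoes+=1
--         return permutacoes
--     while interacoes <n:
--         m=min(lnum)
--         ind= index(lnum,m)
--         lnum=lnum[:ind]+lnum[ind+1:]
--         interacoes+=1
--     return lnum
-- ===== SOURCE B (Python) =====
-- def nth_lowest(lnum: list, n: int):
--     if n <= 0:
--         return list(lnum)
--     t = sorted(lnum)[n - 1]          # n-th smallest value (threshold); IndexError iff n > len(lnum), where A raises too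
--     ties = n - sum(1 for x in lnum if x < t)   # how many occurrences of t to drop
--     out = []
--     for x in lnum:
--         if x < t:
--             continue
--         if x == t and ties > 0:
--             ties -= 1
--             continue
--         out.append(x)
--     return out
-- ===== Notes on version B (the rewrite author's own statement) =====
-- stated objective: faster
-- what changed: A repeatedly scans for the minimum, re-scans for its index and rebuilds the list n times; B sorts once to read off the n-th smallest value as a threshold and removes the n smallest in a single counting pass (all elements below the threshold plus the earliest ties).
import Mathlib
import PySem

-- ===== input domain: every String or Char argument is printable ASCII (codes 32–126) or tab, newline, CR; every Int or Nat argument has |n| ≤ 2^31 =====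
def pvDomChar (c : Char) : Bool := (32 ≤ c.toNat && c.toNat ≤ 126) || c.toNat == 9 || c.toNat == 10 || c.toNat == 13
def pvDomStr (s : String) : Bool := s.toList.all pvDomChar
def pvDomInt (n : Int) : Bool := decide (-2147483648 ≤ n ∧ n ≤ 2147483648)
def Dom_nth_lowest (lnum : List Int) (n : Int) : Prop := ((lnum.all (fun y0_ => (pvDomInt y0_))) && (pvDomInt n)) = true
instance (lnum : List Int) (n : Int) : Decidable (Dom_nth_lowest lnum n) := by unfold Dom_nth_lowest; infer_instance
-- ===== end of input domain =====

-- B replaces A's "find min, scan for its index, delete, repeat n times" loop by one sort that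
-- yields the n-th smallest value as a threshold plus a single counting pass (objective: faster).

-- ===== PORT A =====
-- A's inner helper `index`: scan forward until list[permutacoes] == num; none = IndexError (value absent)
def pyIndexA : List Int → Int → Option Nat
  | [], _ => none
  | x :: xs, num => if x = num then some 0 else (pyIndexA xs num).map (· + 1)

-- A's `while interacoes < n` loop, one iteration per unit of fuel (the loop runs max(n,0) times)
def nthLoopA : Nat → List Int → List Int
  | 0, l => l
  | k + 1, l =>
    match PySem.List.min? l (fun x => x) with
    | none => l      -- Python: min([]) raises ValueError here; excluded by Pre_
    | some m =>
      match pyIndexA l m with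
      | none => l    -- unreachable: m ∈ l (Python's scan would raise IndexError)
      | some ind =>
        nthLoopA k (PySem.List.slice l none (some (ind : Int)) ++
                    PySem.List.slice l (some ((ind : Int) + 1)) none)

def nth_lowest (lnum : List Int) (n : Int) : List Int := nthLoopA n.toNat lnum

-- ===== PORT B =====
-- Source B's single pass: skip everything below t and the first `ties` occurrences of t, keep the rest
def passB (t : Int) : List Int → Int → List Int → List Int
  | [], _, out => out
  | x :: xs, ties, out =>
    if x < t then passB t xs ties out
    else if x = t ∧ 0 < ties then passB t xs (ties - 1) out
    else passB t xs ties (out ++ [x])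

-- Source B's `sum(1 for x in lnum if x < t)`
def cntBelowB (t : Int) (lnum : List Int) : Int :=
  lnum.foldl (fun acc x => if x < t then acc + 1 else acc) 0

def nth_lowest_alt (lnum : List Int) (n : Int) : List Int :=
  if n ≤ 0 then lnum
  else
    match PySem.List.pyGet? (PySem.List.sorted lnum (fun x => x) false) (n - 1) with
    | none => []     -- Python: IndexError (only when n > len(lnum)); excluded by Pre_
    | some t => passB t lnum (n - cntBelowB t lnum) []

-- ===== PRECONDITION & SPEC =====
-- Pre_ is exactly A's return domain: for n > len(lnum) the list runs empty while iterations
-- remain and A raises ValueError on min([]) (B raises IndexError there).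
def Pre_nth_lowest (lnum : List Int) (n : Int) : Prop := n ≤ (lnum.length : Int)
instance (lnum : List Int) (n : Int) : Decidable (Pre_nth_lowest lnum n) := by
  unfold Pre_nth_lowest; infer_instance

def pvWitness_nth_lowest : List Int × Int := ([5, 1, 4, 1, 3], 2)

def Spec_nth_lowest (lnum : List Int) (n : Int) (out : List Int) : Prop := out = nth_lowest_alt lnum n
instance (lnum : List Int) (n : Int) (out : List Int) : Decidable (Spec_nth_lowest lnum n out) := by
  unfold Spec_nth_lowest; infer_instance

-- ===== CLAIM (what is proved, stated in full; the proofs are below) =====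
def Claim_equal_nth_lowest : Prop := ∀ (lnum : List Int) (n : Int), Dom_nth_lowest lnum n → Pre_nth_lowest lnum n → Spec_nth_lowest lnum n (nth_lowest lnum n)

-- ===== LEMMAS AND PROOFS =====

-- proof-side version of passB without the accumulator
def pvP (t : Int) : Int → List Int → List Int
  | _, [] => []
  | c, x :: xs =>
    if x < t then pvP t c xs
    else if x = t ∧ 0 < c then pvP t (c - 1) xs
    else x :: pvP t c xs

theorem passB_eq (t : Int) : ∀ (xs : List Int) (c : Int) (out : List Int),
    passB t xs c out = out ++ pvP t c xs := by
  intro xs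
  induction xs with
  | nil => intro c out; simp [passB, pvP]
  | cons x xs ih =>
    intro c out
    by_cases h1 : x < t
    · simp [passB, pvP, h1, ih]
    · by_cases h2 : x = t ∧ 0 < c
      · simp [passB, pvP, h2, ih]
      · simp [passB, pvP, h1, h2, ih]

theorem pyIndexA_eq_idxOf? : ∀ (l : List Int) (v : Int), pyIndexA l v = List.idxOf? v l := by
  intro l v
  induction l with
  | nil => simp [pyIndexA, List.idxOf?]
  | cons x xs ih =>
    simp only [pyIndexA, List.idxOf?, List.findIdx?_cons, beq_iff_eq]
    by_cases h : x = v
    · simp [h]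
    · simp only [h, if_false, ih, List.idxOf?]

theorem nthLoopA_step (k : Nat) (l : List Int) (m : Int)
    (hm : PySem.List.min? l (fun x => x) = some m) :
    nthLoopA (k + 1) l = nthLoopA k (l.erase m) := by
  have hmem : m ∈ l := PySem.List.min?_mem hm
  obtain ⟨ind, hind⟩ : ∃ i, List.idxOf? m l = some i := by
    cases h : List.idxOf? m l with
    | none => exact absurd hmem (List.idxOf?_eq_none_iff.mp h)
    | some i => exact ⟨i, rfl⟩
  have hcast : (ind : Int) + 1 = ((ind + 1 : Nat) : Int) := by push_cast; ring
  simp only [nthLoopA, hm, pyIndexA_eq_idxOf?, hind, PySem.List.slice_to_natCast, hcast,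
    PySem.List.slice_from_natCast, ← List.eraseIdx_eq_take_drop_succ]
  rw [List.erase_eq_eraseIdx, hind]

-- the head of the sorted list is the min value
theorem sorted_head_min (l : List Int) (m : Int)
    (hm : PySem.List.min? l (fun x => x) = some m) :
    ∃ tl, PySem.List.sorted l (fun x => x) false = m :: tl := by
  have hne : l ≠ [] := by
    intro h; subst h; simp [PySem.List.min?] at hm
  cases hs : PySem.List.sorted l (fun x => x) false with
  | nil => exact absurd ((PySem.List.sorted_eq_nil_iff l (fun x => x) false).mp hs) hne
  | cons h tl =>
    have hhl : h ∈ l := (PySem.List.mem_sorted l (fun x => x) false h).mp (by rw [hs]; exact List.mem_cons_self)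
    have h1 : h ≤ m := PySem.List.key_head_sorted_le l (fun x => x) hs m (PySem.List.min?_mem hm)
    have h2 : m ≤ h := PySem.List.min?_isMin hm h hhl
    exact ⟨tl, by rw [le_antisymm h1 h2]⟩

theorem sorted_erase_min (l : List Int) (m : Int)
    (hm : PySem.List.min? l (fun x => x) = some m) :
    PySem.List.sorted (l.erase m) (fun x => x) false =
      (PySem.List.sorted l (fun x => x) false).tail := by
  obtain ⟨tl, hs⟩ := sorted_head_min l m hm
  have hperm : (l.erase m).Perm tl := by
    have p1 : l.Perm (PySem.List.sorted l (fun x => x) false) :=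
      (PySem.List.sorted_perm l (fun x => x) false).symm
    have p2 := List.Perm.erase m p1
    rw [hs, List.erase_cons_head] at p2
    exact p2
  have heq : PySem.List.sorted (l.erase m) (fun x => x) false
      = PySem.List.sorted tl (fun x => x) false :=
    PySem.List.sorted_eq_sorted_of_perm _ _ _ (fun _ _ h => h) hperm
  have hpw : tl.Pairwise (fun a b : Int => a ≤ b) := by
    have hp := PySem.List.sorted_pairwise l (fun x => x)
    rw [hs] at hp
    exact hp.of_cons
  rw [heq, hs, PySem.List.sorted_eq_self_of_pairwise _ _ hpw]
  rfl

theorem cnt_shift (t : Int) : ∀ (l : List Int) (a : Int),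
    l.foldl (fun acc x => if x < t then acc + 1 else acc) a = a + cntBelowB t l := by
  intro l
  induction l with
  | nil => intro a; simp [cntBelowB]
  | cons x xs ih =>
    intro a
    simp only [cntBelowB, List.foldl_cons]
    rw [ih, ih]
    by_cases h : x < t
    · simp [h]; ring
    · simp [h]

theorem cnt_cons (t x : Int) (xs : List Int) :
    cntBelowB t (x :: xs) = (if x < t then 1 else 0) + cntBelowB t xs := by
  simp only [cntBelowB, List.foldl_cons]
  rw [cnt_shift]
  by_cases h : x < t
  · simp [cntBelowB, h]
  · simp [cntBelowB, h]

theorem cnt_zero (t : Int) (l : List Int) (h : ∀ x ∈ l, t ≤ x) : cntBelowB t l = 0 := by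
  induction l with
  | nil => simp [cntBelowB]
  | cons x xs ih =>
    rw [cnt_cons]
    have hx : ¬ x < t := not_lt.mpr (h x List.mem_cons_self)
    simp [hx, ih (fun y hy => h y (List.mem_cons_of_mem x hy))]

theorem cnt_erase (t m : Int) : ∀ (l : List Int), m ∈ l → m < t →
    cntBelowB t (l.erase m) = cntBelowB t l - 1 := by
  intro l
  induction l with
  | nil => intro h; simp at h
  | cons x xs ih =>
    intro hmem hlt
    by_cases hxm : x = m
    · subst hxm
      rw [List.erase_cons_head, cnt_cons]
      simp [hlt]
    · have hmem' : m ∈ xs := by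
        cases List.mem_cons.mp hmem with
        | inl h => exact absurd h.symm hxm
        | inr h => exact h
      rw [List.erase_cons_tail (by simpa using hxm), cnt_cons, cnt_cons, ih hmem' hlt]
      ring

theorem pvP_erase_lt (t m : Int) (hlt : m < t) : ∀ (l : List Int) (c : Int),
    pvP t c (l.erase m) = pvP t c l := by
  intro l
  induction l with
  | nil => intro c; simp
  | cons x xs ih =>
    intro c
    by_cases hxm : x = m
    · subst hxm
      rw [List.erase_cons_head]
      simp [pvP, hlt]
    · rw [List.erase_cons_tail (by simpa using hxm)]
      by_cases h1 : x < t
      · simp [pvP, h1, ih]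
      · by_cases h2 : x = t ∧ 0 < c
        · simp [pvP, h2, ih]
        · simp [pvP, h1, h2, ih]

theorem pvP_erase_eq (t : Int) : ∀ (l : List Int) (c : Int), (∀ x ∈ l, t ≤ x) → t ∈ l → 0 < c →
    pvP t c l = pvP t (c - 1) (l.erase t) := by
  intro l
  induction l with
  | nil => intro c _ h; simp at h
  | cons x xs ih =>
    intro c hge hmem hc
    by_cases hxt : x = t
    · subst hxt
      rw [List.erase_cons_head]
      simp [pvP, hc]
    · have hxge : ¬ x < t := not_lt.mpr (hge x List.mem_cons_self)
      have hmem' : t ∈ xs := by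
        cases List.mem_cons.mp hmem with
        | inl h => exact absurd h.symm hxt
        | inr h => exact h
      rw [List.erase_cons_tail (by simpa using hxt)]
      simp only [pvP, hxge, if_false, hxt, false_and]
      rw [ih c (fun y hy => hge y (List.mem_cons_of_mem x hy)) hmem' hc]

theorem pvP_id (t : Int) : ∀ (l : List Int), (∀ x ∈ l, t ≤ x) → pvP t 0 l = l := by
  intro l
  induction l with
  | nil => intro _; simp [pvP]
  | cons x xs ih =>
    intro h
    have hx : ¬ x < t := not_lt.mpr (h x List.mem_cons_self)
    simp [pvP, hx, ih (fun y hy => h y (List.mem_cons_of_mem x hy))]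

theorem main_lemma : ∀ (k : Nat) (l : List Int) (t : Int), 0 < k → k ≤ l.length →
    (PySem.List.sorted l (fun x => x) false)[k - 1]? = some t →
    nthLoopA k l = pvP t ((k : Int) - cntBelowB t l) l := by
  intro k
  induction k with
  | zero => intro l t h; exact absurd h (lt_irrefl 0)
  | succ j ih =>
    intro l t _ hlen hget
    have hne : l ≠ [] := by intro h; subst h; simp at hlen
    obtain ⟨m, hm⟩ : ∃ m, PySem.List.min? l (fun x => x) = some m := by
      cases h : PySem.List.min? l (fun x => x) with
      | none => exact absurd ((PySem.List.min?_eq_none_iff l (fun x => x)).mp h) hne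
      | some m => exact ⟨m, rfl⟩
    have hmem : m ∈ l := PySem.List.min?_mem hm
    have hmin : ∀ y ∈ l, m ≤ y := fun y hy => PySem.List.min?_isMin hm y hy
    rw [nthLoopA_step j l m hm]
    cases j with
    | zero =>
      obtain ⟨tl, hs⟩ := sorted_head_min l m hm
      have ht : t = m := by
        rw [hs] at hget
        simp at hget
        omega
      subst ht
      have hc : cntBelowB t l = 0 := cnt_zero t l hmin
      simp only [nthLoopA, hc]
      rw [show ((1 : Nat) : Int) - 0 = 1 by norm_num,
        pvP_erase_eq t l 1 hmin hmem (by norm_num)]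
      norm_num
      exact (pvP_id t _ (fun x hx => hmin x (List.erase_subset hx))).symm
    | succ i =>
      have hlen' : i + 1 ≤ (l.erase m).length := by
        rw [List.length_erase_of_mem hmem]; omega
      have hget' : (PySem.List.sorted (l.erase m) (fun x => x) false)[i + 1 - 1]? = some t := by
        rw [sorted_erase_min l m hm]
        simp only [Nat.add_sub_cancel, List.getElem?_tail]
        simpa using hget
      rw [ih (l.erase m) t (Nat.succ_pos i) hlen' hget']
      have htl : t ∈ l := by
        have hts : t ∈ PySem.List.sorted l (fun x => x) false := List.mem_of_getElem? hget
        exact (PySem.List.mem_sorted l (fun x => x) false t).mp hts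
      rcases lt_or_eq_of_le (hmin t htl) with hlt | heq
      · rw [cnt_erase t m l hmem hlt, pvP_erase_lt t m hlt l]
        congr 1
        push_cast; ring
      · subst heq
        have hc0 : cntBelowB m l = 0 := cnt_zero m l hmin
        have hc0' : cntBelowB m (l.erase m) = 0 :=
          cnt_zero m _ (fun x hx => hmin x (List.erase_subset hx))
        rw [hc0, hc0',
          pvP_erase_eq m l (((i + 1 + 1 : Nat) : Int) - 0) hmin hmem (by push_cast; omega)]
        congr 1
        push_cast; ring

-- ===== VERDICT (by name: the statement is the Claim_ definition above) =====
theorem nth_lowest_spec : Claim_equal_nth_lowest := by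
  intro lnum n _ hpre
  unfold Spec_nth_lowest nth_lowest nth_lowest_alt
  by_cases hn : n ≤ 0
  · simp [hn, Int.toNat_of_nonpos hn, nthLoopA]
  · have hn' : 0 < n := not_le.mp hn
    have hk : ((n.toNat : Int)) = n := Int.toNat_of_nonneg (le_of_lt hn')
    have hk1 : 0 < n.toNat := by omega
    have hklen : n.toNat ≤ lnum.length := by
      unfold Pre_nth_lowest at hpre
      omega
    have hlt : n.toNat - 1 < (PySem.List.sorted lnum (fun x => x) false).length := by
      rw [PySem.List.length_sorted]; omega
    obtain ⟨t, hget⟩ : ∃ t, (PySem.List.sorted lnum (fun x => x) false)[n.toNat - 1]? = some t :=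
      ⟨_, List.getElem?_eq_getElem hlt⟩
    have hpg : PySem.List.pyGet? (PySem.List.sorted lnum (fun x => x) false) (n - 1) = some t := by
      rw [show n - 1 = ((n.toNat - 1 : Nat) : Int) by omega, PySem.List.pyGet?_natCast]
      exact hget
    rw [if_neg hn, hpg]
    show nthLoopA n.toNat lnum = passB t lnum (n - cntBelowB t lnum) []
    rw [passB_eq, List.nil_append, main_lemma n.toNat lnum t hk1 hklen hget, hk]
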